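-- pv_equiv track=rewrite | github.com/rodykings/FEUP-FPRO | RE/RE09/budgeting.py | tospend
-- ===== SOURCE A (Python) =====
-- def tospend(wishlist, catalog):
--     value = 0
--     for i in catalog:
--         if i[0] in wishlist:
--             value += wishlist[i[0]] * i[1]
--         else:
--             continue
--     return value
-- ===== SOURCE B (Python) =====
-- def tospend(wishlist, catalog):
--     # Alternative decomposition: stage a price index over the catalog first,
--     # then traverse the wishlist instead of the catalog.
--     prices = {}
--     for name, p in catalog:
--         prices[name] = prices.get(name, 0) + p
--     total = 0
--     for name, qty in wishlist.items():
--         if name in prices: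
--             total += qty * prices[name]
--     return total
-- ===== Notes on version B (the rewrite author's own statement) =====
-- stated objective: alternative
-- what changed: B inverts the traversal: it first builds a dict summing catalog prices per name, then loops over the wishlist adding qty*price-sum for names present, instead of A's single loop over the catalog with a wishlist lookup per item.
import Mathlib
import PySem

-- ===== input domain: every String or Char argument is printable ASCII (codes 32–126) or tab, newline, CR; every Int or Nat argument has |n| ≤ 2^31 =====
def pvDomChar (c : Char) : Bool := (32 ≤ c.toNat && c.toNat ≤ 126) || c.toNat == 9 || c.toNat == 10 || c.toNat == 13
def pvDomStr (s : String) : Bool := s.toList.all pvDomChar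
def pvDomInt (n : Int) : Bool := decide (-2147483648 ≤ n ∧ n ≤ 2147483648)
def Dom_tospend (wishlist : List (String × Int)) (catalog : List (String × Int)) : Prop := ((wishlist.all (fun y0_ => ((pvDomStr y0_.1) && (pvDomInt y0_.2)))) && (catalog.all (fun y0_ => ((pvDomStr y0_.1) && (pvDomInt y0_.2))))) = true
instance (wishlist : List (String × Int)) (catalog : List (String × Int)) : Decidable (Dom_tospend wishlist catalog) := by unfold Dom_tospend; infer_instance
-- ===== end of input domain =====

-- B inverts the traversal: it builds a per-name price-sum dict from the catalog, then loops over the wishlist; return values proved equal on wishlists with distinct keys (the Python-dict invariant).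


-- ===== PORT A =====
-- A: loop over the catalog; if the name is in the wishlist dict, add wishlist[name] * price.
def tospend (wishlist : List (String × Int)) (catalog : List (String × Int)) : Int :=
  catalog.foldl
    (fun value i =>
      if (PySem.Dict.mk wishlist).contains i.1 then
        value + ((PySem.Dict.mk wishlist).get? i.1).getD 0 * i.2
      else value)
    0

-- ===== PORT B =====
-- B: build a dict summing catalog prices per name, then loop over the wishlist items.
def tospend_alt (wishlist : List (String × Int)) (catalog : List (String × Int)) : Int :=
  let prices := catalog.foldl (fun d i => d.insert i.1 (d.getD i.1 0 + i.2)) PySem.Dict.empty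
  wishlist.foldl
    (fun total p =>
      if prices.contains p.1 then total + p.2 * prices.getD p.1 0 else total)
    0

-- ===== PRECONDITION & SPEC =====
-- Pre_ states only the Python-dict representation invariant: `wishlist` is a dict in Python,
-- so its association list must have pairwise-distinct keys (a list with duplicate keys
-- corresponds to no Python input; A's first-match lookup there is accidental).
def Pre_tospend (wishlist : List (String × Int)) (catalog : List (String × Int)) : Prop :=
  (wishlist.map Prod.fst).Nodup

instance (wishlist : List (String × Int)) (catalog : List (String × Int)) : Decidable (Pre_tospend wishlist catalog) := by unfold Pre_tospend; infer_instance

def pvWitness_tospend : (List (String × Int)) × (List (String × Int)) :=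
  ([("a", 2), ("b", 5)], [("a", 3), ("c", 1), ("a", 4)])

def Spec_tospend (wishlist : List (String × Int)) (catalog : List (String × Int)) (out : Int) : Prop := out = tospend_alt wishlist catalog
instance (wishlist : List (String × Int)) (catalog : List (String × Int)) (out : Int) : Decidable (Spec_tospend wishlist catalog out) := by unfold Spec_tospend; infer_instance

-- ===== CLAIM (what is proved, stated in full; the proofs are below) =====
def Claim_equal_tospend : Prop := ∀ (wishlist : List (String × Int)) (catalog : List (String × Int)), Dom_tospend wishlist catalog → Pre_tospend wishlist catalog → Spec_tospend wishlist catalog (tospend wishlist catalog)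

-- ===== LEMMAS AND PROOFS =====

-- total price of name n in the catalog
def pvS (n : String) (c : List (String × Int)) : Int :=
  (c.map (fun i => if i.1 = n then i.2 else 0)).sum

lemma pvS_cons (n : String) (i : String × Int) (c : List (String × Int)) :
    pvS n (i :: c) = (if i.1 = n then i.2 else 0) + pvS n c := by
  simp [pvS]

-- the built dict's getD is the per-name price sum
lemma prices_getD (c : List (String × Int)) (d : PySem.Dict String Int) (n : String) :
    (c.foldl (fun d i => d.insert i.1 (d.getD i.1 0 + i.2)) d).getD n 0
      = d.getD n 0 + pvS n c := by
  induction c generalizing d with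
  | nil => simp [pvS]
  | cons i c ih =>
      rw [List.foldl_cons, ih, PySem.Dict.getD_insert, pvS_cons]
      by_cases h : n = i.1
      · simp [h]; ring
      · have h' : ¬ i.1 = n := fun e => h e.symm
        simp [h, h']

-- the built dict contains n iff the catalog has key n
lemma prices_contains (c : List (String × Int)) (d : PySem.Dict String Int) (n : String) :
    (c.foldl (fun d i => d.insert i.1 (d.getD i.1 0 + i.2)) d).contains n
      = (d.contains n || c.any (fun i => i.1 == n)) := by
  induction c generalizing d with
  | nil => simp
  | cons i c ih =>
      rw [List.foldl_cons, ih, PySem.Dict.contains_insert, List.any_cons]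
      by_cases h : i.1 = n
      · simp [h]
      · have h' : ¬ n = i.1 := fun e => h e.symm
        have e1 : (n == i.1) = false := by simp [h']
        have e2 : (i.1 == n) = false := by simp [h]
        rw [e1, e2]
        simp

lemma pvS_of_absent (n : String) (c : List (String × Int))
    (h : c.any (fun i => i.1 == n) = false) : pvS n c = 0 := by
  induction c with
  | nil => rfl
  | cons i c ih =>
      simp only [List.any_cons, Bool.or_eq_false_iff] at h
      rw [pvS_cons, ih h.2]
      have : ¬ i.1 = n := by simpa using h.1
      simp [this]

-- B computes the wishlist-indexed sum of qty * price-sum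
lemma tospend_alt_eq (w c : List (String × Int)) :
    tospend_alt w c = w.foldl (fun t p => t + p.2 * pvS p.1 c) 0 := by
  unfold tospend_alt
  apply PySem.List.foldl_congr_mem
  intro acc p _
  by_cases h : (c.foldl (fun d i => d.insert i.1 (d.getD i.1 0 + i.2)) PySem.Dict.empty).contains p.1 = true
  · rw [if_pos h, prices_getD, PySem.Dict.getD_empty, Int.zero_add]
  · rw [if_neg h]
    rw [prices_contains] at h
    simp only [PySem.Dict.contains_empty, Bool.false_or, Bool.not_eq_true] at h
    rw [pvS_of_absent _ _ h]
    simp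

-- wishlist lookup as used by A
def pvG (w : List (String × Int)) (n : String) : Int :=
  ((PySem.Dict.mk w).get? n).getD 0

lemma pvG_nil (n : String) : pvG [] n = 0 := rfl

lemma pvG_cons (k : String) (v : Int) (w : List (String × Int)) (n : String) :
    pvG ((k, v) :: w) n = if k = n then v else pvG w n := by
  unfold pvG
  rw [PySem.Dict.get?_mk_cons]
  by_cases h : k = n <;> simp [h]

-- with distinct keys, a one-hot sum over the wishlist is the dict lookup
lemma onehot_sum (w : List (String × Int)) (hn : (w.map Prod.fst).Nodup)
    (n : String) (m : Int) :
    (w.map (fun p => if p.1 = n then p.2 * m else 0)).sum = pvG w n * m := by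
  induction w with
  | nil => simp [pvG_nil]
  | cons p w ih =>
      obtain ⟨k, v⟩ := p
      simp only [List.map_cons, List.nodup_cons, List.mem_map] at hn
      simp only [List.map_cons, List.sum_cons]
      rw [pvG_cons]
      by_cases h : k = n
      · subst h
        have hz : (w.map (fun q => if q.1 = k then q.2 * m else 0)).sum = 0 := by
          apply List.sum_eq_zero
          intro x hx
          simp only [List.mem_map] at hx
          obtain ⟨q, hq, hxe⟩ := hx
          have hne : ¬ q.1 = k := fun he => hn.1 ⟨q, hq, he⟩
          simp [hne] at hxe
          omega
        simp [hz]
      · simp only [h, if_false, Int.zero_add]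
        exact ih hn.2

-- A computes the catalog-indexed sum of lookup * price
lemma tospend_eq (w c : List (String × Int)) :
    tospend w c = (c.map (fun i => pvG w i.1 * i.2)).sum := by
  unfold tospend
  have hstep : ∀ (v : Int) (i : String × Int),
      (if (PySem.Dict.mk w).contains i.1 then
        v + ((PySem.Dict.mk w).get? i.1).getD 0 * i.2
      else v) = v + pvG w i.1 * i.2 := by
    intro v i
    by_cases h : (PySem.Dict.mk w).contains i.1 = true
    · simp [h, pvG]
    · have hn : (PySem.Dict.mk w).get? i.1 = none := by
        rw [PySem.Dict.get?_eq_none_iff_contains]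
        simp only [Bool.not_eq_true] at h
        exact h
      simp [h, pvG, hn]
  refine Eq.trans (PySem.List.foldl_congr_mem c _ _ 0 (fun acc x _ => hstep acc x)) ?_
  rw [PySem.List.foldl_add]
  simp

-- exchanging the two summations
lemma exchange (w c : List (String × Int)) (hn : (w.map Prod.fst).Nodup) :
    (c.map (fun i => pvG w i.1 * i.2)).sum
      = w.foldl (fun t p => t + p.2 * pvS p.1 c) 0 := by
  rw [PySem.List.foldl_add]
  rw [Int.zero_add]
  induction c with
  | nil => simp [pvS]
  | cons i c ih =>
      simp only [List.map_cons, List.sum_cons, ih]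
      have hexp : ∀ p ∈ w, p.2 * pvS p.1 (i :: c)
          = (if p.1 = i.1 then p.2 * i.2 else 0) + p.2 * pvS p.1 c := by
        intro p _
        rw [pvS_cons]
        by_cases h : p.1 = i.1
        · have h' : i.1 = p.1 := h.symm
          rw [if_pos h, if_pos h']
          ring
        · have h' : ¬ i.1 = p.1 := fun e => h e.symm
          rw [if_neg h, if_neg h']
          ring
      rw [List.map_congr_left hexp, List.sum_map_add, onehot_sum w hn]

-- ===== VERDICT (by name: the statement is the Claim_ definition above) =====
theorem tospend_spec : Claim_equal_tospend := by
  intro w c _ hpre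
  unfold Spec_tospend
  rw [tospend_eq, tospend_alt_eq, exchange w c hpre]
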